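-- pv_equiv track=rewrite | github.com/rowannekabalan/advent-of-code-2024 | day2/main.py | check_almost_sorted
-- ===== SOURCE A (Python) =====
-- def check_sorted(report):
--     return sorted(report) == report or sorted(report, reverse=True) == report
--
-- def check_difference(report):
--     return all(0 < abs(report[i] - report[i+1]) <= 3 for i in range(len(report) - 1))
--
-- def is_strictly_safe(report):
--     return check_difference(report) and check_sorted(report)
--
-- def check_almost_sorted(report):
--     def safe_if_almost_sorted(report, sorted_report):
--         for i in range(len(report)):
--             if report[i] != sorted_report[i]:
--                 report_no_x = report.copy()
--                 report_no_x.pop(i)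
--                 report_no_y = report.copy()
--                 report_no_y.pop(i)
--                 if is_strictly_safe(report_no_x) or is_strictly_safe(report_no_y):
--                     return True
--         return False
--
--     strictly_sorted = check_sorted(report)
--     if strictly_sorted == False:
--         return safe_if_almost_sorted(report, sorted(report)) or safe_if_almost_sorted(report, sorted(report, reverse=True))
--     return False
-- ===== SOURCE B (Python) =====
-- def _good_up(x):
--     return 1 <= x <= 3
--
--
-- def _good_dn(x):
--     return -3 <= x <= -1
--
--
-- def _prefix_good(d, good):
--     # pref[j] == all d[:j] satisfy good
--     pref = [True]
--     for x in d:
--         pref.append(pref[-1] and good(x))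
--     return pref
--
--
-- def check_almost_sorted(report):
--     n = len(report)
--     d = [b - a for a, b in zip(report, report[1:])]
--     if all(x >= 0 for x in d) or all(x <= 0 for x in d):
--         return False
--     asc = sorted(report)
--     desc = sorted(report, reverse=True)
--     m = len(d)
--     pu = _prefix_good(d, _good_up)
--     pd = _prefix_good(d, _good_dn)
--     ru = _prefix_good(list(reversed(d)), _good_up)
--     rd = _prefix_good(list(reversed(d)), _good_dn)
--
--     def ok(pref, rsuf, good, i):
--         # strict safety of report with index i removed, read off the precomputed scans
--         if i == 0:
--             return rsuf[m - 1] if n >= 2 else True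
--         if i == n - 1:
--             return pref[n - 2]
--         return pref[i - 1] and rsuf[m - i - 1] and good(report[i + 1] - report[i - 1])
--
--     return any((report[i] != asc[i] or report[i] != desc[i])
--                and (ok(pu, ru, _good_up, i) or ok(pd, rd, _good_dn, i))
--                for i in range(n))
-- ===== Notes on version B (the rewrite author's own statement) =====
-- stated objective: faster
-- what changed: B sorts only twice up front, decides monotonicity and each single-removal's strict safety from precomputed prefix/suffix scans of adjacent differences (O(1) per candidate) instead of copying and re-sorting per candidate, and folds A's two candidate passes into one pass whose candidate test ORs the two mismatch conditions.
import Mathlib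
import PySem

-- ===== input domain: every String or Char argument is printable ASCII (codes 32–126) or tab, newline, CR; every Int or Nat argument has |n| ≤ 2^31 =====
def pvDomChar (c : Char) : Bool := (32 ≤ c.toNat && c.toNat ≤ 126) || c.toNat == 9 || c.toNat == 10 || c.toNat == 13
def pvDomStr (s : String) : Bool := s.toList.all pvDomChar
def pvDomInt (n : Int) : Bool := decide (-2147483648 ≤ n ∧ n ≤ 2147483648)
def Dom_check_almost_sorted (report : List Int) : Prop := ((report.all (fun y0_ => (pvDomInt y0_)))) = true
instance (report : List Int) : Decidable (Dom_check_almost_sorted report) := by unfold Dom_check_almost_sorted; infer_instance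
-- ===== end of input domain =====

-- B replaces A's per-candidate re-sorting by precomputed linear prefix/suffix delta scans (faster) and folds A's two candidate passes into one.

-- ===== PORT A =====
def pvA_check_sorted (report : List Int) : Bool :=
  (PySem.List.sorted report (fun x => x) false == report) ||
  (PySem.List.sorted report (fun x => x) true == report)

-- report[i] / report[i+1] are always in range here (0 ≤ i < len-1), so pyGetD is exact
def pvA_check_difference (report : List Int) : Bool :=
  (PySem.List.pyRange 0 ((report.length : Int) - 1) 1).all (fun i =>
    decide (0 < |PySem.List.pyGetD report i 0 - PySem.List.pyGetD report (i+1) 0| ∧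
            |PySem.List.pyGetD report i 0 - PySem.List.pyGetD report (i+1) 0| ≤ 3))

def pvA_is_strictly_safe (report : List Int) : Bool :=
  pvA_check_difference report && pvA_check_sorted report

-- the inner for-loop with early 'return True'; report.pop(i) is always in range (0 ≤ i < len)
def pvA_safe_if_almost_sorted (report sorted_report : List Int) : Bool :=
  (PySem.List.pyRange 0 (report.length : Int) 1).any (fun i =>
    if PySem.List.pyGetD report i 0 != PySem.List.pyGetD sorted_report i 0 then
      match PySem.List.pop? report i with
      | some (_, report_no_x) =>
        (match PySem.List.pop? report i with
         | some (_, report_no_y) =>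
             pvA_is_strictly_safe report_no_x || pvA_is_strictly_safe report_no_y
         | none => false)
      | none => false
    else false)

def check_almost_sorted (report : List Int) : Bool :=
  let strictly_sorted := pvA_check_sorted report
  if strictly_sorted = false then
    pvA_safe_if_almost_sorted report (PySem.List.sorted report (fun x => x) false) ||
    pvA_safe_if_almost_sorted report (PySem.List.sorted report (fun x => x) true)
  else false

-- ===== PORT B =====
-- r[1:] is ported with PySem.List.slice; list indexing in B is always in range, so pyGetD is exact
def pvB_deltas (r : List Int) : List Int :=
  (r.zip (PySem.List.slice r (some 1) none)).map (fun p => p.2 - p.1)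

def pvB_good_up (x : Int) : Bool := decide (1 ≤ x ∧ x ≤ 3)
def pvB_good_dn (x : Int) : Bool := decide (-3 ≤ x ∧ x ≤ -1)

-- pref[-1] on the always-nonempty accumulator is getLastD true
def pvB_prefix_good (d : List Int) (good : Int → Bool) : List Bool :=
  d.foldl (fun pref x => pref ++ [pref.getLastD true && good x]) [true]

def pvB_ok (report : List Int) (m : Int) (pref rsuf : List Bool) (good : Int → Bool) (i : Int) : Bool :=
  if i == 0 then
    (if (2:Int) ≤ (report.length : Int) then PySem.List.pyGetD rsuf (m - 1) true else true)
  else if i == (report.length : Int) - 1 then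
    PySem.List.pyGetD pref ((report.length : Int) - 2) true
  else
    (PySem.List.pyGetD pref (i - 1) true &&
     PySem.List.pyGetD rsuf (m - i - 1) true &&
     good (PySem.List.pyGetD report (i + 1) 0 - PySem.List.pyGetD report (i - 1) 0))

def check_almost_sorted_alt (report : List Int) : Bool :=
  let d := pvB_deltas report
  if d.all (fun x => decide (0 ≤ x)) || d.all (fun x => decide (x ≤ 0)) then false
  else
    let asc := PySem.List.sorted report (fun x => x) false
    let desc := PySem.List.sorted report (fun x => x) true
    let m := (d.length : Int)
    let pu := pvB_prefix_good d pvB_good_up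
    let pd := pvB_prefix_good d pvB_good_dn
    let ru := pvB_prefix_good d.reverse pvB_good_up
    let rd := pvB_prefix_good d.reverse pvB_good_dn
    (PySem.List.pyRange 0 (report.length : Int) 1).any (fun i =>
      (PySem.List.pyGetD report i 0 != PySem.List.pyGetD asc i 0 ||
       PySem.List.pyGetD report i 0 != PySem.List.pyGetD desc i 0) &&
      (pvB_ok report m pu ru pvB_good_up i || pvB_ok report m pd rd pvB_good_dn i))

-- ===== PRECONDITION & SPEC =====
def Spec_check_almost_sorted (report : List Int) (out : Bool) : Prop := out = check_almost_sorted_alt report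
instance (report : List Int) (out : Bool) : Decidable (Spec_check_almost_sorted report out) := by unfold Spec_check_almost_sorted; infer_instance

-- ===== CLAIM (what is proved, stated in full; the proofs are below) =====
def Claim_equal_check_almost_sorted : Prop := ∀ (report : List Int), Dom_check_almost_sorted report → Spec_check_almost_sorted report (check_almost_sorted report)

-- ===== LEMMAS AND PROOFS =====

-- strict safety of a whole list as one delta scan (proof-side abbreviation)
def pvB_safe_scan (r : List Int) : Bool :=
  (pvB_deltas r).all pvB_good_up || (pvB_deltas r).all pvB_good_dn

def pv_chain (good : Int → Bool) (b : Bool) : List Int → List Bool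
  | [] => []
  | x :: xs => (b && good x) :: pv_chain good (b && good x) xs

theorem pv_prefix_aux (good : Int → Bool) (l : List Int) :
    ∀ (acc : List Bool), acc ≠ [] →
      l.foldl (fun pref x => pref ++ [pref.getLastD true && good x]) acc =
        acc ++ pv_chain good (acc.getLastD true) l := by
  induction l with
  | nil => intro acc _; simp [pv_chain]
  | cons x xs ih =>
    intro acc hne
    simp only [List.foldl_cons]
    rw [ih (acc ++ [acc.getLastD true && good x]) (by simp)]
    simp [pv_chain]

theorem pv_prefix_eq (good : Int → Bool) (d : List Int) :
    pvB_prefix_good d good = true :: pv_chain good true d := by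
  rw [pvB_prefix_good, pv_prefix_aux good d [true] (by simp)]
  simp

theorem pv_chain_getD (good : Int → Bool) :
    ∀ (l : List Int) (b : Bool) (i : Nat), i < l.length →
      (pv_chain good b l).getD i true = (b && (l.take (i+1)).all good) := by
  intro l
  induction l with
  | nil => intro b i h; simp at h
  | cons x xs ih =>
    intro b i h
    cases i with
    | zero => simp [pv_chain]
    | succ i' =>
      simp only [pv_chain, List.getD_cons_succ, List.take_succ_cons, List.all_cons]
      rw [ih (b && good x) i' (by simpa using h)]
      simp [Bool.and_assoc]

theorem pv_prefix_getD (good : Int → Bool) (d : List Int) (j : Nat) (hj : j ≤ d.length) :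
    PySem.List.pyGetD (pvB_prefix_good d good) (j : Int) true = (d.take j).all good := by
  rw [PySem.List.pyGetD_natCast, pv_prefix_eq]
  cases j with
  | zero => simp
  | succ j' =>
    rw [List.getD_cons_succ]
    rw [pv_chain_getD good d true j' (by omega)]
    simp

theorem pv_length_deltas (r : List Int) : (pvB_deltas r).length = r.length - 1 := by
  simp [pvB_deltas, PySem.List.slice_from_one]

theorem pv_getElem_deltas (r : List Int) (j : Nat) (h : j < (pvB_deltas r).length) :
    (pvB_deltas r)[j] =
      r[j+1]'(by have := pv_length_deltas r; omega) - r[j]'(by have := pv_length_deltas r; omega) := by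
  simp [pvB_deltas, PySem.List.slice_from_one, List.getElem_zip, List.getElem_tail]

theorem pv_take_all_iff (d : List Int) (good : Int → Bool) (t : Nat) :
    ((d.take t).all good = true) ↔ ∀ (j : Nat) (h : j < d.length), j < t → good d[j] = true := by
  rw [List.all_eq_true]
  constructor
  · intro h j hj hjt
    exact h _ (by rw [List.mem_take_iff_getElem]; exact ⟨j, by omega, by simp⟩)
  · rintro h x hx
    rw [List.mem_take_iff_getElem] at hx
    obtain ⟨j, hj, rfl⟩ := hx
    exact h j (by omega) (by omega)

theorem pv_drop_all_iff (d : List Int) (good : Int → Bool) (t : Nat) :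
    ((d.drop t).all good = true) ↔ ∀ (j : Nat) (h : j < d.length), t ≤ j → good d[j] = true := by
  rw [List.all_eq_true]
  constructor
  · intro h j hj hjt
    have hm : d[j] ∈ d.drop t := by
      rw [List.mem_iff_getElem]
      exact ⟨j - t, by rw [List.length_drop]; omega, by rw [List.getElem_drop]; congr 1; omega⟩
    exact h _ hm
  · rintro h x hx
    rw [List.mem_iff_getElem] at hx
    obtain ⟨j, hj, rfl⟩ := hx
    rw [List.getElem_drop]
    exact h (t + j) (by rw [List.length_drop] at hj; omega) (by omega)

theorem pv_deltas_all_iff (g : Int → Bool) (r : List Int) :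
    (pvB_deltas r).all g = true ↔ ∀ (k : Nat) (h : k + 1 < r.length), g (r[k+1] - r[k]) = true := by
  rw [← List.isChain_iff_getElem (R := fun a b => g (b - a) = true)]
  rw [pvB_deltas, PySem.List.slice_from_one]
  induction r with
  | nil => simp
  | cons a t ih =>
    cases t with
    | nil => simp
    | cons b t' =>
      simp only [List.tail_cons, List.zip_cons_cons, List.map_cons, List.all_cons,
        Bool.and_eq_true, List.isChain_cons_cons] at *
      rw [ih]

theorem pv_e_get_lt (r : List Int) (k j : Nat) (hj : j < k) (hjr : j < r.length)
    (h : j < (r.eraseIdx k).length) : (r.eraseIdx k)[j] = r[j] := by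
  rw [List.getElem_eraseIdx, dif_pos hj]

theorem pv_e_get_ge (r : List Int) (k j : Nat) (hj : k ≤ j) (hjr : j + 1 < r.length)
    (h : j < (r.eraseIdx k).length) : (r.eraseIdx k)[j] = r[j+1] := by
  rw [List.getElem_eraseIdx, dif_neg (by omega)]

theorem pv_ok_eq (report : List Int) (good : Int → Bool) (k : Nat)
    (hk : k < report.length) (hn : 3 ≤ report.length) :
    pvB_ok report ((pvB_deltas report).length : Int)
        (pvB_prefix_good (pvB_deltas report) good)
        (pvB_prefix_good (pvB_deltas report).reverse good) good (k : Int)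
      = (pvB_deltas (report.eraseIdx k)).all good := by
  have hm : (pvB_deltas report).length = report.length - 1 := pv_length_deltas report
  have hel : (report.eraseIdx k).length = report.length - 1 := by
    rw [List.length_eraseIdx]; simp [hk]
  rw [Bool.eq_iff_iff, pv_deltas_all_iff]
  by_cases hk0 : k = 0
  · subst hk0
    rw [pvB_ok, if_pos (by simp), if_pos (by omega)]
    rw [show ((pvB_deltas report).length : Int) - 1 = (((pvB_deltas report).length - 1 : Nat) : Int) from by omega,
      pv_prefix_getD good _ _ (by simp),
      List.take_reverse, List.all_reverse, pv_drop_all_iff]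
    constructor
    · intro h j hj
      rw [pv_e_get_ge report 0 (j+1) (by omega) (by omega),
        pv_e_get_ge report 0 j (by omega) (by omega)]
      have := h (j+1) (by omega) (by omega)
      rw [pv_getElem_deltas report (j+1) (by omega)] at this
      exact this
    · intro h j hj hj1
      rw [pv_getElem_deltas report j hj]
      have := h (j-1) (by omega)
      rw [pv_e_get_ge report 0 (j-1+1) (by omega) (by omega),
        pv_e_get_ge report 0 (j-1) (by omega) (by omega)] at this
      have h3 : j - 1 + 1 = j := by omega
      simp only [h3] at this
      exact this
  · by_cases hklast : k = report.length - 1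
    · rw [pvB_ok, if_neg (by simp; omega),
        if_pos (by simp only [beq_iff_eq]; omega)]
      rw [show (report.length : Int) - 2 = ((report.length - 2 : Nat) : Int) from by omega,
        pv_prefix_getD good _ _ (by omega), pv_take_all_iff]
      constructor
      · intro h j hj
        rw [pv_e_get_lt report k (j+1) (by omega) (by omega),
          pv_e_get_lt report k j (by omega) (by omega)]
        have := h j (by omega) (by omega)
        rw [pv_getElem_deltas report j (by omega)] at this
        exact this
      · intro h j hj hj2
        rw [pv_getElem_deltas report j hj]
        have := h j (by omega)
        rw [pv_e_get_lt report k (j+1) (by omega) (by omega),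
          pv_e_get_lt report k j (by omega) (by omega)] at this
        exact this
    · -- interior: 0 < k < report.length - 1
      rw [pvB_ok, if_neg (by simp; omega),
        if_neg (by simp only [beq_iff_eq]; omega)]
      rw [show (k : Int) - 1 = ((k - 1 : Nat) : Int) from by omega,
        show ((pvB_deltas report).length : Int) - (k : Int) - 1 = (((pvB_deltas report).length - k - 1 : Nat) : Int) from by omega,
        show (k : Int) + 1 = (((k + 1 : Nat)) : Int) from by push_cast; ring,
        pv_prefix_getD good _ _ (by omega),
        pv_prefix_getD good _ _ (by simp; omega),
        List.take_reverse, List.all_reverse,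
        PySem.List.pyGetD_natCast, PySem.List.pyGetD_natCast,
        List.getD_eq_getElem report 0 (by omega : k + 1 < report.length),
        List.getD_eq_getElem report 0 (by omega : k - 1 < report.length)]
      simp only [Bool.and_eq_true, pv_take_all_iff, pv_drop_all_iff]
      constructor
      · rintro ⟨⟨h1, h2⟩, h3⟩ j hj
        by_cases hc1 : j < k - 1
        · rw [pv_e_get_lt report k (j+1) (by omega) (by omega),
            pv_e_get_lt report k j (by omega) (by omega)]
          have := h1 j (by omega) (by omega)
          rw [pv_getElem_deltas report j (by omega)] at this
          exact this
        · by_cases hc2 : j = k - 1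
          · subst hc2
            rw [pv_e_get_ge report k (k-1+1) (by omega) (by omega),
              pv_e_get_lt report k (k-1) (by omega) (by omega)]
            have h4 : k - 1 + 1 + 1 = k + 1 := by omega
            simp only [h4]
            exact h3
          · rw [pv_e_get_ge report k (j+1) (by omega) (by omega),
              pv_e_get_ge report k j (by omega) (by omega)]
            have := h2 (j+1) (by omega) (by omega)
            rw [pv_getElem_deltas report (j+1) (by omega)] at this
            exact this
      · intro h
        refine ⟨⟨fun j hj hjk => ?_, fun j hj hjk => ?_⟩, ?_⟩
        · rw [pv_getElem_deltas report j hj]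
          have := h j (by omega)
          rw [pv_e_get_lt report k (j+1) (by omega) (by omega),
            pv_e_get_lt report k j (by omega) (by omega)] at this
          exact this
        · rw [pv_getElem_deltas report j hj]
          have := h (j-1) (by omega)
          rw [pv_e_get_ge report k (j-1+1) (by omega) (by omega),
            pv_e_get_ge report k (j-1) (by omega) (by omega)] at this
          have h3 : j - 1 + 1 = j := by omega
          simp only [h3] at this
          exact this
        · have := h (k-1) (by omega)
          rw [pv_e_get_ge report k (k-1+1) (by omega) (by omega),
            pv_e_get_lt report k (k-1) (by omega) (by omega)] at this
          have h4 : k - 1 + 1 + 1 = k + 1 := by omega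
          simp only [h4] at this
          exact this


theorem pv_adjAll_index (f : Int → Int → Bool) (r : List Int) :
    ((PySem.List.pyRange 0 ((r.length : Int) - 1) 1).all
      (fun i => f (PySem.List.pyGetD r i 0) (PySem.List.pyGetD r (i+1) 0)) = true)
    ↔ ∀ (k : Nat) (h : k + 1 < r.length), f r[k] r[k+1] = true := by
  rw [List.all_eq_true]
  constructor
  · intro h k hk
    have hm : (k : Int) ∈ PySem.List.pyRange 0 ((r.length : Int) - 1) 1 := by
      rw [PySem.List.mem_pyRange_one]; omega
    have h2 := h _ hm
    rw [show (k:Int)+1 = ((k+1:Nat):Int) from by push_cast; ring] at h2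
    rw [PySem.List.pyGetD_natCast, PySem.List.pyGetD_natCast,
      List.getD_eq_getElem r 0 (by omega), List.getD_eq_getElem r 0 hk] at h2
    exact h2
  · intro h i hi
    rw [PySem.List.mem_pyRange_one] at hi
    obtain ⟨h0, h1⟩ := hi
    obtain ⟨k, rfl⟩ : ∃ k : Nat, i = (k : Int) := ⟨i.toNat, (Int.toNat_of_nonneg h0).symm⟩
    have hklt : k + 1 < r.length := by omega
    rw [show (k:Int)+1 = ((k+1:Nat):Int) from by push_cast; ring,
      PySem.List.pyGetD_natCast, PySem.List.pyGetD_natCast,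
      List.getD_eq_getElem r 0 (by omega), List.getD_eq_getElem r 0 hklt]
    exact h k hklt

theorem pv_asc_iff (r : List Int) :
    (PySem.List.sorted r (fun x => x) false = r) ↔
      (pvB_deltas r).all (fun x => decide (0 ≤ x)) = true := by
  rw [pv_deltas_all_iff]
  constructor
  · intro h k hk
    have hp : r.Pairwise (· ≤ ·) := by
      have := PySem.List.sorted_pairwise (xs := r) (key := fun x : Int => x)
      rw [h] at this; exact this
    rw [← List.isChain_iff_pairwise, List.isChain_iff_getElem] at hp
    simpa using by have := hp k hk; omega
  · intro h
    apply PySem.List.sorted_eq_self_of_pairwise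
    rw [← List.isChain_iff_pairwise, List.isChain_iff_getElem]
    intro k hk
    have := h k hk
    simp at this; omega

theorem pv_desc_iff (r : List Int) :
    (PySem.List.sorted r (fun x => x) true = r) ↔
      (pvB_deltas r).all (fun x => decide (x ≤ 0)) = true := by
  rw [pv_deltas_all_iff]
  constructor
  · intro h k hk
    have hp : r.Pairwise (fun a b : Int => b ≤ a) := by
      have := PySem.List.sorted_pairwise_rev (xs := r) (key := fun x : Int => x)
      rw [h] at this; exact this
    rw [← @List.isChain_iff_pairwise Int (fun a b : Int => b ≤ a) r ⟨fun h1 h2 => le_trans h2 h1⟩,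
      List.isChain_iff_getElem] at hp
    simpa using by have := hp k hk; omega
  · intro h
    apply PySem.List.sorted_rev_eq_self_of_pairwise
    rw [← @List.isChain_iff_pairwise Int (fun a b : Int => b ≤ a) r ⟨fun h1 h2 => le_trans h2 h1⟩,
      List.isChain_iff_getElem]
    intro k hk
    have := h k hk
    simp at this; omega

theorem pv_check_sorted_eq (r : List Int) :
    pvA_check_sorted r =
      ((pvB_deltas r).all (fun x => decide (0 ≤ x)) || (pvB_deltas r).all (fun x => decide (x ≤ 0))) := by
  rw [Bool.eq_iff_iff]
  simp only [pvA_check_sorted, Bool.or_eq_true, beq_iff_eq]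
  rw [pv_asc_iff, pv_desc_iff]


theorem pv_safe_eq (r : List Int) :
    pvA_is_strictly_safe r = pvB_safe_scan r := by
  rw [Bool.eq_iff_iff]
  simp only [pvA_is_strictly_safe, pvB_safe_scan, Bool.and_eq_true, Bool.or_eq_true]
  rw [show pvA_check_difference r = true ↔
        ∀ (k : Nat) (h : k + 1 < r.length),
          decide (0 < |r[k] - r[k+1]| ∧ |r[k] - r[k+1]| ≤ 3) = true from
      pv_adjAll_index (fun a b => decide (0 < |a - b| ∧ |a - b| ≤ 3)) r]
  rw [pvA_check_sorted, Bool.or_eq_true]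
  simp only [beq_iff_eq]
  rw [pv_asc_iff, pv_desc_iff, pv_deltas_all_iff, pv_deltas_all_iff,
    pv_deltas_all_iff, pv_deltas_all_iff]
  simp only [pvB_good_up, pvB_good_dn, decide_eq_true_eq]
  constructor
  · rintro ⟨hd, hm | hm⟩
    · left; intro k hk; have h1 := hd k hk; have h2 := hm k hk
      rcases abs_cases (r[k] - r[k+1]) with ⟨he, _⟩ | ⟨he, _⟩ <;> omega
    · right; intro k hk; have h1 := hd k hk; have h2 := hm k hk
      rcases abs_cases (r[k] - r[k+1]) with ⟨he, _⟩ | ⟨he, _⟩ <;> omega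
  · rintro (hs | hs)
    · refine ⟨fun k hk => ?_, Or.inl fun k hk => ?_⟩ <;>
        (have := hs k hk; rcases abs_cases (r[k] - r[k+1]) with ⟨he, _⟩ | ⟨he, _⟩ <;> omega)
    · refine ⟨fun k hk => ?_, Or.inr fun k hk => ?_⟩ <;>
        (have := hs k hk; rcases abs_cases (r[k] - r[k+1]) with ⟨he, _⟩ | ⟨he, _⟩ <;> omega)

theorem pv_loopbody_iff (report s : List Int) (k : Nat) (hk : k < report.length) :
    ((if PySem.List.pyGetD report (k:Int) 0 != PySem.List.pyGetD s (k:Int) 0 then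
        match PySem.List.pop? report (k:Int) with
        | some (_, report_no_x) =>
          (match PySem.List.pop? report (k:Int) with
           | some (_, report_no_y) =>
               pvA_is_strictly_safe report_no_x || pvA_is_strictly_safe report_no_y
           | none => false)
        | none => false
      else false) = true)
    ↔ (PySem.List.pyGetD report (k:Int) 0 ≠ PySem.List.pyGetD s (k:Int) 0 ∧
        pvB_safe_scan (report.eraseIdx k) = true) := by
  rw [PySem.List.pop?_natCast report k hk]
  cases hb : (PySem.List.pyGetD report (k:Int) 0 != PySem.List.pyGetD s (k:Int) 0) with
  | false => simp only [bne_eq_false_iff_eq] at hb; simp [hb]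
  | true =>
    simp only [bne_iff_ne] at hb
    simp only [if_true, Bool.or_self, pv_safe_eq]
    exact ⟨fun h => ⟨hb, h⟩, fun h => h.2⟩

theorem pv_nonmono_three (r : List Int)
    (h : ((pvB_deltas r).all (fun x => decide (0 ≤ x)) ||
          (pvB_deltas r).all (fun x => decide (x ≤ 0))) = false) :
    3 ≤ r.length := by
  have hm := pv_length_deltas r
  rw [Bool.or_eq_false_iff] at h
  obtain ⟨h1, h2⟩ := h
  rw [List.all_eq_false] at h1 h2
  obtain ⟨x, hx, hxp⟩ := h1
  obtain ⟨y, hy, hyp⟩ := h2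
  simp only [decide_eq_true_eq] at hxp hyp
  cases hd : pvB_deltas r with
  | nil => rw [hd] at hx; simp at hx
  | cons a t =>
    cases t with
    | nil =>
      rw [hd] at hx hy
      simp at hx hy
      omega
    | cons b t' =>
      rw [hd] at hm
      simp at hm
      omega

theorem pv_Bbody_iff (report s t : List Int) (k : Nat)
    (hk : k < report.length) (hn : 3 ≤ report.length) :
    (((PySem.List.pyGetD report (k:Int) 0 != PySem.List.pyGetD s (k:Int) 0 ||
       PySem.List.pyGetD report (k:Int) 0 != PySem.List.pyGetD t (k:Int) 0) &&
      (pvB_ok report ((pvB_deltas report).length : Int)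
          (pvB_prefix_good (pvB_deltas report) pvB_good_up)
          (pvB_prefix_good (pvB_deltas report).reverse pvB_good_up) pvB_good_up (k:Int) ||
       pvB_ok report ((pvB_deltas report).length : Int)
          (pvB_prefix_good (pvB_deltas report) pvB_good_dn)
          (pvB_prefix_good (pvB_deltas report).reverse pvB_good_dn) pvB_good_dn (k:Int))) = true)
    ↔ ((PySem.List.pyGetD report (k:Int) 0 ≠ PySem.List.pyGetD s (k:Int) 0 ∨
        PySem.List.pyGetD report (k:Int) 0 ≠ PySem.List.pyGetD t (k:Int) 0) ∧
        pvB_safe_scan (report.eraseIdx k) = true) := by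
  rw [pv_ok_eq report pvB_good_up k hk hn, pv_ok_eq report pvB_good_dn k hk hn]
  simp [pvB_safe_scan, Bool.and_eq_true, Bool.or_eq_true, bne_iff_ne]

theorem pv_main (report : List Int) : check_almost_sorted report = check_almost_sorted_alt report := by
  simp only [check_almost_sorted, check_almost_sorted_alt]
  rw [pv_check_sorted_eq]
  by_cases hs : ((pvB_deltas report).all (fun x => decide (0 ≤ x)) ||
                 (pvB_deltas report).all (fun x => decide (x ≤ 0))) = true
  · simp [hs]
  · rw [Bool.not_eq_true] at hs
    have hn3 : 3 ≤ report.length := pv_nonmono_three report hs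
    simp only [hs, Bool.false_eq_true, if_false, if_true]
    rw [Bool.eq_iff_iff]
    simp only [pvA_safe_if_almost_sorted, Bool.or_eq_true, List.any_eq_true]
    constructor
    · rintro (⟨i, hi, h⟩ | ⟨i, hi, h⟩) <;>
      · rw [PySem.List.mem_pyRange_one] at hi
        obtain ⟨k, rfl⟩ : ∃ k : Nat, i = (k : Int) := ⟨i.toNat, (Int.toNat_of_nonneg hi.1).symm⟩
        have hk : k < report.length := by omega
        rw [pv_loopbody_iff report _ k hk] at h
        refine ⟨(k:Int), by rw [PySem.List.mem_pyRange_one]; omega, ?_⟩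
        rw [pv_Bbody_iff report _ _ k hk hn3]
        exact ⟨by tauto, h.2⟩
    · rintro ⟨i, hi, h⟩
      rw [PySem.List.mem_pyRange_one] at hi
      obtain ⟨k, rfl⟩ : ∃ k : Nat, i = (k : Int) := ⟨i.toNat, (Int.toNat_of_nonneg hi.1).symm⟩
      have hk : k < report.length := by omega
      rw [pv_Bbody_iff report _ _ k hk hn3] at h
      obtain ⟨hm | hm, hsafe⟩ := h
      · exact Or.inl ⟨(k:Int), by rw [PySem.List.mem_pyRange_one]; omega,
          (pv_loopbody_iff report _ k hk).mpr ⟨hm, hsafe⟩⟩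
      · exact Or.inr ⟨(k:Int), by rw [PySem.List.mem_pyRange_one]; omega,
          (pv_loopbody_iff report _ k hk).mpr ⟨hm, hsafe⟩⟩

-- ===== VERDICT (by name: the statement is the Claim_ definition above) =====
theorem check_almost_sorted_spec : Claim_equal_check_almost_sorted := by
  intro report _
  exact pv_main report
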